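-- pv_equiv track=rewrite | github.com/berthaultleandre/rl-baselines3-zoo | scripts/ur_plot.py | get_dataset_limits
-- ===== SOURCE A (Python) =====
-- def get_dataset_limits(dataset, min_val, max_val):
-- 	low_limit = 0
-- 	high_limit = len(dataset)
-- 	i = 0
-- 	found_min = False
-- 	for e in dataset:
-- 		if (not found_min and e >= min_val):
-- 			low_limit = i
-- 			found_min = True
-- 		if (e >= max_val):
-- 			high_limit = i - 1
-- 			break
-- 		i = i + 1
-- 	if not found_min:
-- 		return None
-- 	return low_limit, high_limit
-- ===== SOURCE B (Python) =====
-- def get_dataset_limits(dataset, min_val, max_val):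
--     high_idx = next((i for i, e in enumerate(dataset) if e >= max_val), None)
--     prefix = dataset if high_idx is None else dataset[:high_idx + 1]
--     low_idx = next((i for i, e in enumerate(prefix) if e >= min_val), None)
--     if low_idx is None:
--         return None
--     return low_idx, (len(dataset) if high_idx is None else high_idx - 1)
-- ===== Notes on version B (the rewrite author's own statement) =====
-- stated objective: simpler
-- what changed: Replaces the single stateful loop with break and found_min/low_limit/high_limit bookkeeping by two declarative scans: first find the index of the first element >= max_val, then find the first element >= min_val inside the prefix up to that index.
import Mathlib
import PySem

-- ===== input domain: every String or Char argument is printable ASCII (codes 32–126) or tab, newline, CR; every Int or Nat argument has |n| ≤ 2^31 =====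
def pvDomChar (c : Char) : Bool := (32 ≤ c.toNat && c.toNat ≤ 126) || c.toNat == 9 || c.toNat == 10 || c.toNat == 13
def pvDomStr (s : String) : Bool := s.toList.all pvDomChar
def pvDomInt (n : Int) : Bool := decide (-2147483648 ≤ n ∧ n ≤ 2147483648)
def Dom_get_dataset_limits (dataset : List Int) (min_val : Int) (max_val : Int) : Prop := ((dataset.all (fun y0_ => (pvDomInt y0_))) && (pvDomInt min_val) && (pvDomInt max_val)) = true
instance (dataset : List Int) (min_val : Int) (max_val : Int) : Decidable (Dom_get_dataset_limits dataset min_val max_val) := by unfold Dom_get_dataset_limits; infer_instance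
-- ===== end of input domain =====

-- B replaces A's single stateful loop (break, found_min flag) by two declarative scans:
-- first index >= max_val, then first index >= min_val within that prefix. Objective: simpler.


-- ===== PORT A =====
-- literal transliteration of A's loop: state (low_limit, high_limit, i, found_min), break on e >= max_val
def pvALoop (min_val max_val : Int) : List Int → Int → Int → Int → Bool → (Int × Int × Bool)
  | [], low, high, _, found => (low, high, found)
  | e :: rest, low, high, i, found =>
    let s : Int × Bool := if !found && decide (e ≥ min_val) then (i, true) else (low, found)
    if e ≥ max_val then (s.1, i - 1, s.2)
    else pvALoop min_val max_val rest s.1 high (i + 1) s.2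

def get_dataset_limits (dataset : List Int) (min_val : Int) (max_val : Int) : Option (Int × Int) :=
  let r := pvALoop min_val max_val dataset 0 (dataset.length : Int) 0 false
  if r.2.2 then some (r.1, r.2.1) else none

-- ===== PORT B =====
def get_dataset_limits_alt (dataset : List Int) (min_val : Int) (max_val : Int) : Option (Int × Int) :=
  let highIdx := dataset.findIdx? (fun e => e ≥ max_val)
  let pre := match highIdx with
    | none => dataset
    | some h => dataset.take (h + 1)
  match pre.findIdx? (fun e => e ≥ min_val) with
  | none => none
  | some l => some ((l : Int),
      match highIdx with
      | none => (dataset.length : Int)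
      | some h => (h : Int) - 1)

-- ===== PRECONDITION & SPEC =====
def Spec_get_dataset_limits (dataset : List Int) (min_val : Int) (max_val : Int) (out : Option (Int × Int)) : Prop := out = get_dataset_limits_alt dataset min_val max_val
instance (dataset : List Int) (min_val : Int) (max_val : Int) (out : Option (Int × Int)) : Decidable (Spec_get_dataset_limits dataset min_val max_val out) := by unfold Spec_get_dataset_limits; infer_instance

-- ===== CLAIM (what is proved, stated in full; the proofs are below) =====
def Claim_equal_get_dataset_limits : Prop := ∀ (dataset : List Int) (min_val : Int) (max_val : Int), Dom_get_dataset_limits dataset min_val max_val → Spec_get_dataset_limits dataset min_val max_val (get_dataset_limits dataset min_val max_val)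

-- ===== LEMMAS AND PROOFS =====

-- once found_min is set, low is frozen and only the max-scan remains
theorem pvALoop_found (min_val max_val : Int) (l : List Int) :
    ∀ (low high i : Int), pvALoop min_val max_val l low high i true =
      (low, (match l.findIdx? (fun e => e ≥ max_val) with
             | some k => i + (k : Int) - 1
             | none => high), true) := by
  induction l with
  | nil => intro low high i; simp [pvALoop]
  | cons e rest ih =>
    intro low high i
    by_cases hmax : e ≥ max_val
    · simp [pvALoop, hmax, List.findIdx?_cons]
    · simp [pvALoop, hmax, ih, List.findIdx?_cons]
      cases h : rest.findIdx? (fun e => decide (e ≥ max_val)) with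
      | none => simp
      | some k => simp; ring

-- while found_min is false, the loop's result is characterised by the two scans of B
theorem pvALoop_notfound (min_val max_val : Int) (l : List Int) :
    ∀ (low high i : Int), pvALoop min_val max_val l low high i false =
      (let hk := l.findIdx? (fun e => e ≥ max_val)
       let pre := match hk with | none => l | some k => l.take (k + 1)
       let hi : Int := match hk with | none => high | some k => i + (k : Int) - 1
       match pre.findIdx? (fun e => e ≥ min_val) with
       | none => (low, hi, false)
       | some m => (i + (m : Int), hi, true)) := by
  induction l with
  | nil => intro low high i; simp [pvALoop]
  | cons e rest ih =>
    intro low high i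
    by_cases hmin : e ≥ min_val <;> by_cases hmax : e ≥ max_val
    · simp [pvALoop, hmin, hmax, List.findIdx?_cons]
    · simp only [pvALoop, hmin, hmax, decide_true,
        Bool.not_false, Bool.true_and, if_true, if_false]
      rw [pvALoop_found]
      cases h : rest.findIdx? (fun e => decide (e ≥ max_val)) with
      | none => simp [List.findIdx?_cons, hmin, hmax, h]
      | some k => simp [List.findIdx?_cons, hmin, hmax, h]; ring
    · simp [pvALoop, hmin, hmax, List.findIdx?_cons]
    · simp only [pvALoop, hmin, hmax, decide_false,
        Bool.not_false, Bool.and_false, Bool.false_eq_true, if_false]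
      rw [ih]
      cases h : rest.findIdx? (fun e => decide (e ≥ max_val)) with
      | none =>
        cases h2 : rest.findIdx? (fun e => decide (e ≥ min_val)) with
        | none => simp [List.findIdx?_cons, hmin, hmax, h, h2]
        | some m => simp [List.findIdx?_cons, hmin, hmax, h, h2]; ring
      | some k =>
        cases h2 : (rest.take (k+1)).findIdx? (fun e => decide (e ≥ min_val)) with
        | none => simp [List.findIdx?_cons, hmin, hmax, h, h2]; ring
        | some m =>
          simp [List.findIdx?_cons, hmin, hmax, h, h2]
          constructor <;> ring

-- ===== VERDICT (by name: the statement is the Claim_ definition above) =====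
theorem get_dataset_limits_spec : Claim_equal_get_dataset_limits := by
  intro dataset min_val max_val _
  unfold Spec_get_dataset_limits get_dataset_limits get_dataset_limits_alt
  rw [pvALoop_notfound]
  simp only []
  cases hk : dataset.findIdx? (fun e => e ≥ max_val) with
  | none =>
        cases hm : dataset.findIdx? (fun e => e ≥ min_val) with
    | none => simp
    | some m => simp
  | some k =>
        cases hm : (dataset.take (k+1)).findIdx? (fun e => e ≥ min_val) with
    | none => simp
    | some m => simp
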